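-- pv_equiv track=rewrite | github.com/ozifirebrand/NLP-Terms-Filtering | app.py | generate_seed_variations
-- ===== SOURCE A (Python) =====
-- def generate_seed_variations(seed_keyword):
--     words = seed_keyword.lower().split()
--     variations = set()
--     n = len(words)
--     max_ngram = n  # Use n as the maximum n-gram length for variations
--     for ngram in range(1, max_ngram +1):
--         for i in range(len(words) - ngram +1):
--             variation = ' '.join(words[i:i+ngram])
--             variations.add(variation)
--     return variations
-- ===== SOURCE B (Python) =====
-- def generate_seed_variations(seed_keyword):
--     words = seed_keyword.lower().split()
--     variations = set()
--     level = words            # n-grams of the current length, indexed by start position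
--     suffix = words[1:]       # the word each current n-gram is extended with
--     while level:
--         variations.update(level)
--         level = [g + ' ' + w for g, w in zip(level, suffix)]
--         suffix = suffix[1:]
--     return variations
-- ===== Notes on version B (the rewrite author's own statement) =====
-- stated objective: alternative
-- what changed: Instead of re-slicing and re-joining a fixed-length window for every (length, start) pair, B keeps one list of current n-grams and grows each by one word per round (zip with the remaining words), so every n-gram is built incrementally from the previous level with a single string concatenation.
import Mathlib
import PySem

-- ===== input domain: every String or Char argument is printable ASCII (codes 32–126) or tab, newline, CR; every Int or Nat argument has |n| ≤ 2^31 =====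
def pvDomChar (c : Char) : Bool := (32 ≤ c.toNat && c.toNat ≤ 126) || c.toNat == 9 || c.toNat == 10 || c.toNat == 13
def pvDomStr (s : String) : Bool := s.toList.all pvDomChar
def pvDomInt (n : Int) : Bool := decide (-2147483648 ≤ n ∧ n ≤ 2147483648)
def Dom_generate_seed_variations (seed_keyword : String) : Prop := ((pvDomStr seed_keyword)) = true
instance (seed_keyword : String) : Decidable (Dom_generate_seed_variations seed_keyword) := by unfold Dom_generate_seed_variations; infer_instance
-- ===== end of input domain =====

-- B builds each n-gram incrementally (one concatenation per step, level by level) instead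
-- of re-slicing and re-joining a window per (length, start) pair; return value only, no mutation.

-- ===== PORT A =====
def generate_seed_variations (seed_keyword : String) : List String :=
  let words := PySem.Str.split₀ (PySem.Str.lower seed_keyword)
  let n : Int := (words.length : Int)
  let max_ngram : Int := n
  (PySem.List.pyRange 1 (max_ngram + 1) 1).foldl
    (fun variations ngram =>
      (PySem.List.pyRange 0 ((words.length : Int) - ngram + 1) 1).foldl
        (fun variations i =>
          PySem.Set.add variations
            (PySem.Str.join " " (PySem.List.slice words (some i) (some (i + ngram)))))
        variations)
    PySem.Set.empty

-- ===== PORT B =====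
-- g + ' ' + w
def pvGrow (g w : String) : String := g ++ " " ++ w

-- the while loop of Source B: level = current n-grams, suffix = the words each gets extended with
def pvBLoop (level suffix : List String) (variations : PySem.Set String) : PySem.Set String :=
  if _h : level = [] then variations
  else pvBLoop (List.zipWith pvGrow level suffix) (PySem.List.slice suffix (some 1) none)
         (PySem.Set.update variations level)
termination_by level.length + suffix.length
decreasing_by
  simp only [List.length_zipWith, PySem.List.slice_from_one, List.length_tail]
  have hL : 0 < level.length := List.length_pos_of_ne_nil _h
  omega

def generate_seed_variations_alt (seed_keyword : String) : List String :=
  let words := PySem.Str.split₀ (PySem.Str.lower seed_keyword)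
  pvBLoop words (PySem.List.slice words (some 1) none) PySem.Set.empty

-- ===== PRECONDITION & SPEC =====
def Spec_generate_seed_variations (seed_keyword : String) (out : List String) : Prop := out = generate_seed_variations_alt seed_keyword
instance (seed_keyword : String) (out : List String) : Decidable (Spec_generate_seed_variations seed_keyword out) := by unfold Spec_generate_seed_variations; infer_instance

-- ===== CLAIM (what is proved, stated in full; the proofs are below) =====
def Claim_equal_generate_seed_variations : Prop := ∀ (seed_keyword : String), Dom_generate_seed_variations seed_keyword → Spec_generate_seed_variations seed_keyword (generate_seed_variations seed_keyword)

-- ===== LEMMAS AND PROOFS =====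

-- the list of n-grams of length g, by start position (empty once g > length)
def pvL (ws : List String) (g : Nat) : List String :=
  (List.range (ws.length + 1 - g)).map (fun i => PySem.Str.join " " ((ws.drop i).take g))

theorem pvJoin_singleton (x : String) : PySem.Str.join " " [x] = x := by
  apply String.toList_inj.mp
  simp [PySem.Str.toList_join, PySem.Chars.join_singleton]

theorem pvChars_join_snoc (sep : List Char) (xs : List (List Char)) (y : List Char) (h : xs ≠ []) :
    PySem.Chars.join sep (xs ++ [y]) = PySem.Chars.join sep xs ++ sep ++ y := by
  induction xs with
  | nil => exact absurd rfl h
  | cons a t ih =>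
    cases t with
    | nil => simp [PySem.Chars.join_cons_cons, PySem.Chars.join_singleton]
    | cons b r =>
      have h2 := ih (by simp)
      simp only [List.cons_append, PySem.Chars.join_cons_cons] at h2 ⊢
      rw [h2]
      simp

theorem pvJoin_snoc (xs : List String) (y : String) (h : xs ≠ []) :
    PySem.Str.join " " (xs ++ [y]) = pvGrow (PySem.Str.join " " xs) y := by
  apply String.toList_inj.mp
  simp only [pvGrow, PySem.Str.toList_join, List.map_append, List.map_cons, List.map_nil,
    String.toList_append]
  rw [pvChars_join_snoc _ _ _ (by simpa using h)]

theorem pvL_one (ws : List String) : pvL ws 1 = ws := by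
  apply List.ext_getElem
  · simp [pvL]
  · intro i h1 h2
    simp only [pvL] at h1 ⊢
    simp only [List.getElem_map, List.getElem_range]
    rw [List.take_one, List.head?_drop, List.getElem?_eq_getElem h2]
    simp [pvJoin_singleton]

theorem pvL_step (ws : List String) (g : Nat) (hg : 1 ≤ g) :
    List.zipWith pvGrow (pvL ws g) (ws.drop g) = pvL ws (g + 1) := by
  apply List.ext_getElem
  · simp [pvL]; omega
  · intro i h1 h2
    have hlen : i + g < ws.length := by
      simp only [List.length_zipWith, pvL, List.length_map, List.length_range,
        List.length_drop] at h1
      omega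
    simp only [pvL, List.length_map, List.length_range] at h2
    simp only [List.getElem_zipWith, pvL, List.getElem_map, List.getElem_range,
      List.getElem_drop]
    rw [← pvJoin_snoc]
    · congr 1
      rw [List.take_add_one]
      congr 1
      rw [List.getElem?_eq_getElem (by simp; omega)]
      simp only [List.getElem_drop, Option.toList_some]
      congr 2
      omega
    · have : g ≤ (ws.drop i).length := by simp; omega
      intro hnil
      have := List.length_take_of_le this
      rw [hnil] at this
      simp at this
      omega

theorem pvL_nil (ws : List String) : pvL ws (ws.length + 1) = [] := by
  simp [pvL]

-- A's inner loop over start positions adds exactly the level list pvL ws g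
theorem pvInner (ws : List String) (g : Nat) (hg : g ≤ ws.length + 1) (s : PySem.Set String) :
    (PySem.List.pyRange 0 ((ws.length : Int) - (g : Int) + 1) 1).foldl
      (fun variations i =>
        PySem.Set.add variations
          (PySem.Str.join " " (PySem.List.slice ws (some i) (some (i + (g : Int))))))
      s = PySem.Set.update s (pvL ws g) := by
  have hcast : (ws.length : Int) - (g : Int) + 1 = ((ws.length + 1 - g : Nat) : Int)  := by omega
  rw [hcast, PySem.List.pyRange_zero_natCast, List.foldl_map]
  show _ = (pvL ws g).foldl PySem.Set.add s
  rw [pvL, List.foldl_map]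
  apply PySem.List.foldl_congr_mem
  intro acc k _
  rw [PySem.List.slice_natCast_add]

theorem pvOuter {β : Type} (n : Nat) (F : β → Int → β) (s : β) :
    (PySem.List.pyRange 1 ((n : Int) + 1) 1).foldl F s
      = (List.range n).foldl (fun s' (k : Nat) => F s' ((k : Int) + 1)) s := by
  induction n generalizing s with
  | zero => simp [PySem.List.pyRange]
  | succ m ih =>
    have h1 : ((m + 1 : Nat) : Int) + 1 = ((m : Int) + 1) + 1 := by omega
    rw [h1, PySem.List.pyRange_one_succ_right (by omega), List.foldl_append, ih,
      List.range_succ, List.foldl_append]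
    simp

-- the whole B loop, level by level
theorem pvBLoop_spec (ws : List String) (m g : Nat) (hg : 1 ≤ g) (hm : g + m = ws.length + 1)
    (s : PySem.Set String) :
    pvBLoop (pvL ws g) (ws.drop g) s =
      (List.range m).foldl (fun s' k => PySem.Set.update s' (pvL ws (g + k))) s := by
  induction m generalizing g s with
  | zero =>
    have : g = ws.length + 1 := by omega
    rw [pvBLoop, this]
    simp [pvL_nil]
  | succ p ih =>
    have hne : pvL ws g ≠ [] := by
      apply List.ne_nil_of_length_pos
      simp [pvL]; omega
    rw [pvBLoop, dif_neg hne, PySem.List.slice_from_one, List.tail_drop,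
      pvL_step ws g hg, ih (g + 1) (by omega) (by omega)]
    rw [List.range_succ_eq_map, List.foldl_cons, List.foldl_map, Nat.add_zero]
    apply PySem.List.foldl_congr_mem
    intro acc k _
    congr 2
    omega

-- ===== VERDICT (by name: the statement is the Claim_ definition above) =====
theorem generate_seed_variations_spec : Claim_equal_generate_seed_variations := by
  intro seed_keyword _
  unfold Spec_generate_seed_variations generate_seed_variations generate_seed_variations_alt
  dsimp only
  generalize PySem.Str.split₀ (PySem.Str.lower seed_keyword) = ws
  have h1 := pvBLoop_spec ws ws.length 1 (by omega) (by omega) PySem.Set.empty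
  rw [pvL_one] at h1
  rw [PySem.List.slice_from_one, ← List.drop_one, h1, pvOuter]
  apply PySem.List.foldl_congr_mem
  intro acc k hk
  have hk' : k + 1 ≤ ws.length + 1 := by
    have := List.mem_range.mp hk; omega
  have hcast : ((k : Int) + 1) = (((k + 1 : Nat)) : Int) := by omega
  rw [hcast, pvInner ws (k + 1) hk']
  congr 2
  omega
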